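-- pv_equiv track=rewrite | github.com/heitorchang/learn-code | codefights/interview/bit_manipulation/streamValidation.py | streamValidation
-- ===== SOURCE A (Python) =====
-- def firstBitsMatch(n, mask, length):
--     check = n ^ mask
--     threshold = (1 << (8 - length)) - 1
--     # the idea is to ensure the most significant bits (leftmost) all
--     # match. In case they don't, XOR will result in a '1' at the
--     # non-matching position. So we check that the result is no
--     # greater than the number of "wild" bits to the right
--
--     # pr('bin(check)')
--     # pr('bin(threshold)')
--     if check > threshold:
--         return False
--     return True
--
-- def streamValidation(stream):
--     index = 0
--     while index < len(stream):
--         n = stream[index]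
--         if firstBitsMatch(n, 0b11111000, 5):
--             # five 1s in a row is not valid
--             return False
--         elif firstBitsMatch(n, 0b11110000, 5):
--             # four 1s in a row, expecting three 10xxxxxx
--             try:
--                 n1 = stream[index+1]
--                 n2 = stream[index+2]
--                 n3 = stream[index+3]
--                 if not firstBitsMatch(n1, 0b10000000, 2):
--                     return False
--                 if not firstBitsMatch(n2, 0b10000000, 2):
--                     return False
--                 if not firstBitsMatch(n3, 0b10000000, 2):
--                     return False
--                 index += 4
--             except IndexError:
--                 return False
--         elif firstBitsMatch(n, 0b11100000, 4):
--             # three 1s in a row, expecting two 10xxxxxx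
--             try:
--                 n1 = stream[index+1]
--                 n2 = stream[index+2]
--                 if not firstBitsMatch(n1, 0b10000000, 2):
--                     return False
--                 if not firstBitsMatch(n2, 0b10000000, 2):
--                     return False
--                 index += 3
--             except IndexError:
--                 return False
--         elif firstBitsMatch(n, 0b11000000, 3):
--             # two 1s in a row, expecting one 10xxxxxx
--             try:
--                 n1 = stream[index+1]
--                 if not firstBitsMatch(n1, 0b10000000, 2):
--                     return False
--                 index += 2
--             except IndexError:
--                 return False
--         elif n > 0x7f:
--             return False
--         else:
--             index += 1
--     return True
-- ===== SOURCE B (Python) =====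
-- def firstBitsMatch(n, mask, length):
--     check = n ^ mask
--     threshold = (1 << (8 - length)) - 1
--     if check > threshold:
--         return False
--     return True
--
-- def streamValidation(stream):
--     remaining = 0
--     for n in stream:
--         if remaining > 0:
--             if not firstBitsMatch(n, 0b10000000, 2):
--                 return False
--             remaining -= 1
--         elif firstBitsMatch(n, 0b11111000, 5):
--             return False
--         elif firstBitsMatch(n, 0b11110000, 5):
--             remaining = 3
--         elif firstBitsMatch(n, 0b11100000, 4):
--             remaining = 2
--         elif firstBitsMatch(n, 0b11000000, 3):
--             remaining = 1
--         elif n > 0x7f: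
--             return False
--     return remaining == 0
-- ===== Notes on version B (the rewrite author's own statement) =====
-- stated objective: idiomatic
-- what changed: Replaces A's index-jumping while loop (which fetches 1-3 lookahead continuation bytes per leader inside try/except IndexError) with a single-step linear state machine that keeps a counter of expected continuation bytes and checks remaining==0 after the loop.
import Mathlib
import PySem

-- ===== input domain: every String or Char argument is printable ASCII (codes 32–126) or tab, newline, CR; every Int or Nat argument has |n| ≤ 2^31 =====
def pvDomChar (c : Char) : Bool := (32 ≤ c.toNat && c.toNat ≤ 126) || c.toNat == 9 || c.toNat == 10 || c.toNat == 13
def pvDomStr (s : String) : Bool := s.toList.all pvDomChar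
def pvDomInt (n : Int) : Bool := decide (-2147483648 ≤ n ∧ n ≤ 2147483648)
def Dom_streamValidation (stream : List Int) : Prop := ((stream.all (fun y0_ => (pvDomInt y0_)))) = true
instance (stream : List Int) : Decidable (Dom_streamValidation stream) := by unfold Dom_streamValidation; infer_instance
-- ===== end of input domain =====

-- B replaces A's index-jumping while loop by a single-step linear state machine
-- (a counter of expected continuation bytes); objective: idiomatic/simpler, same O(n) cost.


-- ===== PORT A =====
-- firstBitsMatch(n, mask, length): n ^ mask, compared against (1 << (8-length)) - 1
def firstBitsMatch (n mask : Int) (length : Nat) : Bool :=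
  let check := PySem.Int.bxor n mask
  let threshold := ((1 : Int) <<< (8 - length)) - 1
  if check > threshold then false else true

-- A's while loop over an index that jumps by 1/2/3/4; stream[index+k] with k ≥ 0,
-- so List.getElem? (none = IndexError) is exact here.
def streamValidationLoopA (stream : List Int) (index : Nat) : Bool :=
  if h : index < stream.length then
    let n := stream[index]
    if firstBitsMatch n 0xF8 5 then false
    else if firstBitsMatch n 0xF0 5 then
      match stream[index+1]?, stream[index+2]?, stream[index+3]? with
      | some n1, some n2, some n3 =>
        if ¬ firstBitsMatch n1 0x80 2 then false
        else if ¬ firstBitsMatch n2 0x80 2 then false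
        else if ¬ firstBitsMatch n3 0x80 2 then false
        else streamValidationLoopA stream (index+4)
      | _, _, _ => false
    else if firstBitsMatch n 0xE0 4 then
      match stream[index+1]?, stream[index+2]? with
      | some n1, some n2 =>
        if ¬ firstBitsMatch n1 0x80 2 then false
        else if ¬ firstBitsMatch n2 0x80 2 then false
        else streamValidationLoopA stream (index+3)
      | _, _ => false
    else if firstBitsMatch n 0xC0 3 then
      match stream[index+1]? with
      | some n1 =>
        if ¬ firstBitsMatch n1 0x80 2 then false
        else streamValidationLoopA stream (index+2)
      | none => false
    else if n > 0x7f then false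
    else streamValidationLoopA stream (index+1)
  else true
termination_by stream.length - index
decreasing_by all_goals omega

def streamValidation (stream : List Int) : Bool := streamValidationLoopA stream 0

-- ===== PORT B =====
-- B: one step per byte, `remaining` counts pending continuation bytes; at the end remaining == 0.
def streamValidationLoopB : List Int → Nat → Bool
  | [], remaining => remaining == 0
  | n :: rest, remaining =>
    if remaining > 0 then
      if ¬ firstBitsMatch n 0x80 2 then false
      else streamValidationLoopB rest (remaining - 1)
    else if firstBitsMatch n 0xF8 5 then false
    else if firstBitsMatch n 0xF0 5 then streamValidationLoopB rest 3
    else if firstBitsMatch n 0xE0 4 then streamValidationLoopB rest 2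
    else if firstBitsMatch n 0xC0 3 then streamValidationLoopB rest 1
    else if n > 0x7f then false
    else streamValidationLoopB rest 0

def streamValidation_alt (stream : List Int) : Bool := streamValidationLoopB stream 0

-- ===== PRECONDITION & SPEC =====
def Spec_streamValidation (stream : List Int) (out : Bool) : Prop := out = streamValidation_alt stream
instance (stream : List Int) (out : Bool) : Decidable (Spec_streamValidation stream out) := by unfold Spec_streamValidation; infer_instance

-- ===== CLAIM (what is proved, stated in full; the proofs are below) =====
def Claim_equal_streamValidation : Prop := ∀ (stream : List Int), Dom_streamValidation stream → Spec_streamValidation stream (streamValidation stream)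

-- ===== LEMMAS AND PROOFS =====

-- B's loop with remaining ≠ 0 reads one byte (none = truncation → false).
lemma loopB_pos (s : List Int) (i k : Nat) (hk : k ≠ 0) :
    streamValidationLoopB (s.drop i) k =
      match s[i]? with
      | none => false
      | some c =>
        if ¬ firstBitsMatch c 0x80 2 then false
        else streamValidationLoopB (s.drop (i+1)) (k-1) := by
  by_cases h : i < s.length
  · rw [List.drop_eq_getElem_cons h, List.getElem?_eq_getElem h]
    simp [streamValidationLoopB, Nat.pos_of_ne_zero hk]
  · rw [List.drop_eq_nil_of_le (by omega), List.getElem?_eq_none (by omega)]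
    simp [streamValidationLoopB, hk]

lemma loopA_eq_loopB (n : Nat) : ∀ (s : List Int) (i : Nat), s.length - i ≤ n →
    streamValidationLoopA s i = streamValidationLoopB (s.drop i) 0 := by
  induction n with
  | zero =>
    intro s i h
    rw [streamValidationLoopA, List.drop_eq_nil_of_le (by omega)]
    simp [streamValidationLoopB]
    omega
  | succ n ih =>
    intro s i h
    by_cases hi : i < s.length
    · rw [streamValidationLoopA]
      simp only [dif_pos hi]
      rw [List.drop_eq_getElem_cons hi]
      conv_rhs => rw [streamValidationLoopB, if_neg (by omega : ¬ (0:Nat) > 0)]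
      split_ifs with h1 h2 h3 h4 h5
      · rfl
      · -- 11110xxx leader: three continuation bytes
        rw [loopB_pos s (i+1) 3 (by omega)]
        cases h1' : s[i+1]? with
        | none => cases h2' : s[i+2]? <;> cases h3' : s[i+3]? <;> rfl
        | some n1 =>
          dsimp only
          by_cases hc1 : firstBitsMatch n1 0x80 2
          · rw [if_neg (by simp [hc1]), show i+1+1 = i+2 from rfl,
                show (3:Nat)-1 = 2 from rfl, loopB_pos s (i+2) 2 (by omega)]
            cases h2' : s[i+2]? with
            | none => cases h3' : s[i+3]? <;> simp
            | some n2 =>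
              dsimp only
              by_cases hc2 : firstBitsMatch n2 0x80 2
              · rw [if_neg (by simp [hc2]), show i+2+1 = i+3 from rfl,
                    show (2:Nat)-1 = 1 from rfl, loopB_pos s (i+3) 1 (by omega)]
                cases h3' : s[i+3]? with
                | none => simp
                | some n3 =>
                  dsimp only
                  by_cases hc3 : firstBitsMatch n3 0x80 2
                  · have e := ih s (i+4) (by omega)
                    simp [hc1, hc2, hc3, show i+3+1 = i+4 from rfl, e]
                  · simp [hc1, hc2, hc3]
              · cases h3' : s[i+3]? <;> simp [hc1, hc2]
          · cases h2' : s[i+2]? <;> cases h3' : s[i+3]? <;> simp [hc1]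
      · -- 1110xxxx leader: two continuation bytes
        rw [loopB_pos s (i+1) 2 (by omega)]
        cases h1' : s[i+1]? with
        | none => cases h2' : s[i+2]? <;> rfl
        | some n1 =>
          dsimp only
          by_cases hc1 : firstBitsMatch n1 0x80 2
          · rw [if_neg (by simp [hc1]), show i+1+1 = i+2 from rfl,
                show (2:Nat)-1 = 1 from rfl, loopB_pos s (i+2) 1 (by omega)]
            cases h2' : s[i+2]? with
            | none => simp
            | some n2 =>
              dsimp only
              by_cases hc2 : firstBitsMatch n2 0x80 2
              · have e := ih s (i+3) (by omega)
                simp [hc1, hc2, show i+2+1 = i+3 from rfl, e]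
              · simp [hc1, hc2]
          · cases h2' : s[i+2]? <;> simp [hc1]
      · -- 110xxxxx leader: one continuation byte
        rw [loopB_pos s (i+1) 1 (by omega)]
        cases h1' : s[i+1]? with
        | none => rfl
        | some n1 =>
          dsimp only
          by_cases hc1 : firstBitsMatch n1 0x80 2
          · have e := ih s (i+2) (by omega)
            simp [hc1, show i+1+1 = i+2 from rfl, e]
          · simp [hc1]
      · rfl
      · exact ih s (i+1) (by omega)
    · rw [streamValidationLoopA, dif_neg hi, List.drop_eq_nil_of_le (by omega)]
      simp [streamValidationLoopB]

-- ===== VERDICT (by name: the statement is the Claim_ definition above) =====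
theorem streamValidation_spec : Claim_equal_streamValidation := by
  intro s _
  show streamValidation s = streamValidation_alt s
  unfold streamValidation streamValidation_alt
  simpa using loopA_eq_loopB s.length s 0 (by omega)
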